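-- pv_equiv track=rewrite | github.com/jerry1700/Algorithm | 백준/Silver/5397. 키로거/키로거.py | solve
-- ===== SOURCE A (Python) =====
-- def solve(password):
--     left_word = []
--     right_word = []
--
--     for w in password:
--         if w == "<":
--             if left_word:
--                 right_word.append(left_word.pop())
--         elif w == ">":
--             if right_word:
--                 left_word.append(right_word.pop())
--         elif w == "-":
--             if left_word:
--                 left_word.pop()
--         else:
--             left_word.append(w)
--
--     return "".join(left_word + list(reversed(right_word)))
-- ===== SOURCE B (Python) =====
-- def solve(password):
--     text = ""
--     cursor = 0
--     for w in password:
--         if w == "<":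
--             cursor = max(cursor - 1, 0)
--         elif w == ">":
--             cursor = min(cursor + 1, len(text))
--         elif w == "-":
--             if cursor:
--                 text = text[:cursor - 1] + text[cursor:]
--                 cursor -= 1
--         else:
--             text = text[:cursor] + w + text[cursor:]
--             cursor += 1
--     return text
-- ===== Notes on version B (the rewrite author's own statement) =====
-- stated objective: alternative
-- what changed: Replaces the two-stack representation (push/pop on left_word/right_word plus a final reversed join) by an immutable string rebuilt by slicing around an integer cursor, with cursor moves expressed as max/min clamps instead of emptiness guards and no final reversal or join.
import Mathlib
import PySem

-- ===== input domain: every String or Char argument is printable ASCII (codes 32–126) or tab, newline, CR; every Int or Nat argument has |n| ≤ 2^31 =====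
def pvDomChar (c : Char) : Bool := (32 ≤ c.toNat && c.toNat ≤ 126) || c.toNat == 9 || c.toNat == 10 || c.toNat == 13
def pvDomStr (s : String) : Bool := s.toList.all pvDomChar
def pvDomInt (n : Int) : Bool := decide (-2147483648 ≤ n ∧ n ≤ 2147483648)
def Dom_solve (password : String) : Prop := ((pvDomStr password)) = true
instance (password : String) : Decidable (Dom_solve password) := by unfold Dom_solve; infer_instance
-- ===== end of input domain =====

-- B rebuilds the text as one immutable string sliced around an integer cursor
-- (max/min clamps, no stacks, no final reversal): an alternative of similar cost.

-- ===== PORT A =====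
-- loop body of A: two stacks, append/pop at the end (pop = getLastD/dropLast, guarded nonempty)
def solveStep (st : List Char × List Char) (w : Char) : List Char × List Char :=
  if w = '<' then
    if st.1 ≠ [] then (st.1.dropLast, st.2 ++ [st.1.getLastD ' ']) else st
  else if w = '>' then
    if st.2 ≠ [] then (st.1 ++ [st.2.getLastD ' '], st.2.dropLast) else st
  else if w = '-' then
    if st.1 ≠ [] then (st.1.dropLast, st.2) else st
  else (st.1 ++ [w], st.2)

def solve (password : String) : String :=
  let st := password.toList.foldl solveStep ([], [])
  String.ofList (st.1 ++ st.2.reverse)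

-- ===== PORT B =====
-- recursion over the remaining commands; text[:i] / text[i:] become take/drop;
-- Python's max(cursor-1, 0) is Nat truncated subtraction (cursor is never negative)
def solveAltGo : List Char → List Char → Nat → List Char
  | [], text, _ => text
  | w :: ws, text, c =>
    if w = '<' then solveAltGo ws text (max (c - 1) 0)
    else if w = '>' then solveAltGo ws text (min (c + 1) text.length)
    else if w = '-' then
      if c ≠ 0 then solveAltGo ws (text.take (c - 1) ++ text.drop c) (c - 1)
      else solveAltGo ws text c
    else solveAltGo ws (text.take c ++ w :: text.drop c) (c + 1)

def solve_alt (password : String) : String :=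
  String.ofList (solveAltGo password.toList [] 0)

-- ===== PRECONDITION & SPEC =====
def Spec_solve (password : String) (out : String) : Prop := out = solve_alt password
instance (password : String) (out : String) : Decidable (Spec_solve password out) := by unfold Spec_solve; infer_instance

-- ===== CLAIM (what is proved, stated in full; the proofs are below) =====
def Claim_equal_solve : Prop := ∀ (password : String), Dom_solve password → Spec_solve password (solve password)

-- ===== LEMMAS AND PROOFS =====

-- B's state (text, cursor) that corresponds to A's two-stack state (l, r)
theorem go_rel (cs l r : List Char) :
    solveAltGo cs (l ++ r.reverse) l.length
      = (cs.foldl solveStep (l, r)).1 ++ (cs.foldl solveStep (l, r)).2.reverse := by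
  induction cs generalizing l r with
  | nil => rfl
  | cons w ws ih =>
    simp only [List.foldl_cons, solveAltGo, solveStep]
    by_cases h1 : w = '<'
    · simp only [h1, ite_true]
      induction l using List.reverseRecOn with
      | nil => simp only [List.nil_append, List.length_nil] at ih ⊢; exact ih [] r
      | append_singleton l' x _ =>
        have := ih l' (r ++ [x])
        simpa [List.append_assoc, Nat.max_eq_left] using this
    · by_cases h2 : w = '>'
      · simp only [h2, ite_true]
        induction r using List.reverseRecOn with
        | nil =>
          have := ih l ([] : List Char)
          simpa [Nat.min_eq_right] using this
        | append_singleton r' y _ =>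
          have := ih (l ++ [y]) r'
          have hmin : min (l.length + 1) (l ++ (r' ++ [y]).reverse).length = l.length + 1 :=
            Nat.min_eq_left (by simp)
          simpa [List.append_assoc, hmin] using this
      · by_cases h3 : w = '-'
        · simp only [h3, ite_true]
          induction l using List.reverseRecOn with
          | nil => simp only [List.nil_append, List.length_nil] at ih ⊢; exact ih [] r
          | append_singleton l' x _ =>
            have := ih l' r
            have htake : ((l' ++ [x]) ++ r.reverse).take l'.length = l' := by
              rw [List.append_assoc]
              simpa using List.take_left' rfl
            have hdrop : ((l' ++ [x]) ++ r.reverse).drop (l'.length + 1) = r.reverse := by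
              have : ((l' ++ [x]) ++ r.reverse).drop (l' ++ [x]).length = r.reverse :=
                List.drop_left
              simpa using this
            simpa [htake, hdrop] using this
        · simp only [if_neg h1, if_neg h2, if_neg h3]
          have := ih (l ++ [w]) r
          have htake : (l ++ r.reverse).take l.length = l := List.take_left' rfl
          have hdrop : (l ++ r.reverse).drop l.length = r.reverse := List.drop_left
          simpa [htake, hdrop, List.append_assoc] using this

-- ===== VERDICT (by name: the statement is the Claim_ definition above) =====
theorem solve_spec : Claim_equal_solve := by
  intro password _
  unfold Spec_solve solve solve_alt
  have h := go_rel password.toList [] []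
  simp only [List.reverse_nil, List.append_nil, List.length_nil] at h
  show String.ofList _ = _
  rw [← h]
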